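-- pv_equiv track=rewrite | github.com/mar-coding/EnteghalMini01 | line_decode/decode.py | decode_unipolar_nrz_to_input
-- ===== SOURCE A (Python) =====
-- def decode_unipolar_nrz_to_input(bits):
--     input_array = []
--
--     for bit in bits:
--         if bit == '0':
--             input_array.append(0)
--         elif bit == '1':
--             input_array.append(1)
--         else:
--             raise ValueError("Invalid bit value. Only '0' and '1' are allowed.")
--
--     return input_array
-- ===== SOURCE B (Python) =====
-- def decode_unipolar_nrz_to_input(bits):
--     def go(lo, hi):
--         if hi - lo == 0:
--             return []
--         if hi - lo == 1:
--             b = bits[lo]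
--             if b == '0':
--                 return [0]
--             if b == '1':
--                 return [1]
--             raise ValueError("Invalid bit value. Only '0' and '1' are allowed.")
--         mid = (lo + hi) // 2
--         return go(lo, mid) + go(mid, hi)
--     return go(0, len(bits))
-- ===== Notes on version B (the rewrite author's own statement) =====
-- stated objective: alternative
-- what changed: Replaced A's left-to-right accumulate-and-append loop by a divide-and-conquer recursion on index ranges that decodes each half and concatenates the results.
import Mathlib
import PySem

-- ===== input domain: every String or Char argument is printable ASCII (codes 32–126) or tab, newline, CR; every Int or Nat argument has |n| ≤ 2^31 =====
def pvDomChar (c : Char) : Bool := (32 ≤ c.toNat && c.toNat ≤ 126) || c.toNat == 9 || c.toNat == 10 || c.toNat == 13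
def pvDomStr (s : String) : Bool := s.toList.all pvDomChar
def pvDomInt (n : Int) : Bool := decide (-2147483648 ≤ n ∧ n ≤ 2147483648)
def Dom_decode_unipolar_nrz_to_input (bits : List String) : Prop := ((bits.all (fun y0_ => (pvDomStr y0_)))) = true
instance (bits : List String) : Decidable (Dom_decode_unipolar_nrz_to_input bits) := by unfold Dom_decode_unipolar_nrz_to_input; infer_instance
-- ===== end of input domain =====

-- B decodes by divide-and-conquer over index ranges instead of A's left-to-right append loop (alternative decomposition, same result).

-- ===== PORT A =====
-- A appends 0/1 per element left to right, raising ValueError at the first invalid element (those inputs are outside Pre_).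
def decode_unipolar_nrz_to_input (bits : List String) : List Int :=
  match bits with
  | [] => []
  | bit :: rest =>
    if bit = "0" then 0 :: decode_unipolar_nrz_to_input rest
    else if bit = "1" then 1 :: decode_unipolar_nrz_to_input rest
    else []  -- ValueError: unreachable under Pre_

-- ===== PORT B =====
-- go bits lo hi decodes the index range [lo, hi); it is only invoked with hi ≤ bits.length,
-- so in the singleton case Python's bits[lo] is an in-range index and List.getD is exact there.
def pvDecodeGo (bits : List String) (lo hi : Nat) : List Int :=
  if hi - lo = 0 then []
  else if hi - lo = 1 then
    let b := bits.getD lo ""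
    if b = "0" then [0]
    else if b = "1" then [1]
    else []  -- ValueError: unreachable under Pre_
  else
    pvDecodeGo bits lo ((lo + hi) / 2) ++ pvDecodeGo bits ((lo + hi) / 2) hi
termination_by hi - lo
decreasing_by all_goals omega

def decode_unipolar_nrz_to_input_alt (bits : List String) : List Int :=
  pvDecodeGo bits 0 bits.length

-- ===== PRECONDITION & SPEC =====
-- Pre_ excludes exactly the inputs containing an element other than "0"/"1", where the Python A raises ValueError.
def Pre_decode_unipolar_nrz_to_input (bits : List String) : Prop :=
  ∀ b ∈ bits, b = "0" ∨ b = "1"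
instance (bits : List String) : Decidable (Pre_decode_unipolar_nrz_to_input bits) := by unfold Pre_decode_unipolar_nrz_to_input; infer_instance
def pvWitness_decode_unipolar_nrz_to_input : List String := ["1", "0", "1"]
def Spec_decode_unipolar_nrz_to_input (bits : List String) (out : List Int) : Prop := out = decode_unipolar_nrz_to_input_alt bits
instance (bits : List String) (out : List Int) : Decidable (Spec_decode_unipolar_nrz_to_input bits out) := by unfold Spec_decode_unipolar_nrz_to_input; infer_instance

-- ===== CLAIM (what is proved, stated in full; the proofs are below) =====
def Claim_equal_decode_unipolar_nrz_to_input : Prop := ∀ (bits : List String), Dom_decode_unipolar_nrz_to_input bits → Pre_decode_unipolar_nrz_to_input bits → Spec_decode_unipolar_nrz_to_input bits (decode_unipolar_nrz_to_input bits)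

-- ===== LEMMAS AND PROOFS =====
-- The common value both programs compute on valid input: map each bit string to its integer.
theorem pvGo_eq (bits : List String)
    (hpre : ∀ b ∈ bits, b = "0" ∨ b = "1") :
    ∀ n lo hi, hi - lo = n → hi ≤ bits.length →
      pvDecodeGo bits lo hi
        = ((bits.drop lo).take (hi - lo)).map (fun b => if b = "1" then (1 : Int) else 0) := by
  intro n
  induction n using Nat.strong_induction_on with
  | _ n ih =>
    intro lo hi hn hle
    rcases Nat.eq_zero_or_pos n with h0 | hpos
    · subst h0
      rw [pvDecodeGo]
      simp [hn]
    · rcases Nat.lt_or_ge n 2 with h1 | h2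
      · have hn1 : hi - lo = 1 := by omega
        have hlt : lo < bits.length := by omega
        have hseg : (bits.drop lo).take 1 = [bits[lo]] := by
          rw [List.drop_eq_getElem_cons hlt]
          rfl
        rw [pvDecodeGo, hn1, hseg]
        rcases hpre bits[lo] (List.getElem_mem hlt) with hv | hv <;>
          simp [List.getElem?_eq_getElem hlt, hv]
      · have hne0 : ¬ hi - lo = 0 := by omega
        have hne1 : ¬ hi - lo = 1 := by omega
        rw [pvDecodeGo]
        simp only [hne0, hne1, if_false]
        set mid := (lo + hi) / 2 with hmid
        have hlm : lo < mid := by omega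
        have hmh : mid < hi := by omega
        rw [ih (mid - lo) (by omega) lo mid rfl (by omega),
            ih (hi - mid) (by omega) mid hi rfl hle]
        have hsplit : (bits.drop lo).take (hi - lo)
            = (bits.drop lo).take (mid - lo) ++ (bits.drop mid).take (hi - mid) := by
          have h1 : hi - lo = (mid - lo) + (hi - mid) := by omega
          rw [h1, List.take_add, List.drop_drop]
          have h2 : lo + (mid - lo) = mid := by omega
          rw [h2]
        rw [hsplit, List.map_append]

theorem pvA_eq (bits : List String)
    (hpre : ∀ b ∈ bits, b = "0" ∨ b = "1") :
    decode_unipolar_nrz_to_input bits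
      = bits.map (fun b => if b = "1" then (1 : Int) else 0) := by
  induction bits with
  | nil => rfl
  | cons bit rest ih =>
    have hrest := ih (fun b hb => hpre b (by simp [hb]))
    rcases hpre bit (by simp) with hv | hv
    · simp [decode_unipolar_nrz_to_input, hv, hrest]
    · simp [decode_unipolar_nrz_to_input, hv, hrest]

-- ===== VERDICT (by name: the statement is the Claim_ definition above) =====
theorem decode_unipolar_nrz_to_input_spec : Claim_equal_decode_unipolar_nrz_to_input := by
  intro bits _ hpre
  unfold Spec_decode_unipolar_nrz_to_input decode_unipolar_nrz_to_input_alt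
  rw [pvA_eq bits hpre, pvGo_eq bits hpre bits.length 0 bits.length rfl le_rfl]
  simp
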